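-- pv_equiv track=rewrite | github.com/alexandraback/datacollection | solutions_5688567749672960_1/Python/rutsky/a.py | solve
-- ===== SOURCE A (Python) =====
-- def count_to_10_in_k(k):
--     assert k >= 1
--
--     if k == 1:
--         return 10
--
--     res = count_to_10_in_k(k - 1)
--
--     if k % 2 == 0:
--         c = k // 2
--         res1 = 10 ** c
--         res2 = 10 ** c - 1
--     else:
--         c = (k - 1) // 2
--         res1 = 10 ** c
--         res2 = 10 ** (c + 1) - 1
--
--     return res + res1 + res2
--
-- def solve(N):
--     if N < 10:
--         return N
--
--     k = len(str(N))
--     c0 = count_to_10_in_k(k - 1)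
--
--     part1 = str(N)[:k // 2]
--     part2 = str(N)[k // 2:]
--
--     if part1 == str(10 ** (k // 2 - 1)):
--         c2 = int(part2)
--         return c0 + c2
--
--     elif int(part2) == 0:
--         res = solve(N - 1) + 1
--         return res
--
--     else:
--         c1 = int(part1[::-1])
--         c2 = int(part2)
--
--         res = c0 + c1 + c2
--
--         return res
-- ===== SOURCE B (Python) =====
-- def _count_upto(k):
--     # closed form for A's count_to_10_in_k (k >= 1)
--     p = k // 2
--     q = (k - 1) // 2
--     return 11 - k + 2 * (10 ** (p + 1) - 10) // 9 + 11 * (10 ** (q + 1) - 10) // 9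
--
-- def solve(N):
--     if N < 10:
--         return N
--     s = str(N)
--     h = len(s) // 2
--     left, right = s[:h], s[h:]
--     c2 = int(right)
--     base = _count_upto(len(s) - 1)
--     if left == str(10 ** (h - 1)):
--         return base + c2
--     if c2 == 0:
--         return solve(N - 1) + 1
--     return base + int(''.join(reversed(left))) + c2
-- ===== Notes on version B (the rewrite author's own statement) =====
-- stated objective: alternative
-- what changed: The per-length counter count_to_10_in_k is replaced by a closed-form geometric-series formula (no recursion), and solve computes str(N), the split point and the suffix value once instead of re-slicing and re-parsing per branch.
import Mathlib
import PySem

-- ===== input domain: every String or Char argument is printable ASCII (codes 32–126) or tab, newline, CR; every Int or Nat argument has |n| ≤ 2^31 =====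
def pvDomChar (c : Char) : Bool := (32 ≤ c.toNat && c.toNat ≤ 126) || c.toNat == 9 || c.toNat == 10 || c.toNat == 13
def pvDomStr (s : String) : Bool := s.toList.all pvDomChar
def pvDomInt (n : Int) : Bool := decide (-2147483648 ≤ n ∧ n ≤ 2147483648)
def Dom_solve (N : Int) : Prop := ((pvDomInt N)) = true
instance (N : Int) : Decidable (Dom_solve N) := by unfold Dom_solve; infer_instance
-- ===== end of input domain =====

-- B replaces A's recursive per-length counter by a closed-form formula and computes the
-- digit string / split / suffix value once (objective: alternative; return value only).

-- ===== PORT A =====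
-- count_to_10_in_k: recursion on k.  Python asserts k >= 1; solve only calls it with
-- k >= 1, so the (unreachable) k <= 0 AssertionError region just returns 10 here.
-- Python's `10 ** c` has c >= 0 at every reachable call, so `.toNat` on the exponent is exact.
def countTo10 (k : Int) : Int :=
  if _h : k ≤ 1 then 10
  else
    let res := countTo10 (k - 1)
    if PySem.Int.mod k 2 = 0 then
      let c := PySem.Int.floordiv k 2
      let res1 := (10:Int) ^ c.toNat
      let res2 := (10:Int) ^ c.toNat - 1
      res + res1 + res2
    else
      let c := PySem.Int.floordiv (k - 1) 2
      let res1 := (10:Int) ^ c.toNat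
      let res2 := (10:Int) ^ (c + 1).toNat - 1
      res + res1 + res2
termination_by k.toNat
decreasing_by omega

-- solve: A recomputes str(N) at each use, so `PySem.Int.toChars N` is inlined at each use.
-- int(part2) never raises (part2 is a nonempty digit string) and part1[::-1] never fails
-- (step -1 slice), so `.getD` defaults are unreachable.
def solve (N : Int) : Int :=
  if _h : N < 10 then N
  else if PySem.Chars.slice (PySem.Int.toChars N) none
        (some (PySem.Int.floordiv ((PySem.Int.toChars N).length : Int) 2)) =
      PySem.Int.toChars ((10:Int) ^ (PySem.Int.floordiv ((PySem.Int.toChars N).length : Int) 2 - 1).toNat) then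
    countTo10 (((PySem.Int.toChars N).length : Int) - 1) +
      (PySem.Int.ofChars? (PySem.Chars.slice (PySem.Int.toChars N)
        (some (PySem.Int.floordiv ((PySem.Int.toChars N).length : Int) 2)) none)).getD 0
  else if (PySem.Int.ofChars? (PySem.Chars.slice (PySem.Int.toChars N)
        (some (PySem.Int.floordiv ((PySem.Int.toChars N).length : Int) 2)) none)).getD 0 = 0 then
    solve (N - 1) + 1
  else
    countTo10 (((PySem.Int.toChars N).length : Int) - 1) +
      (PySem.Int.ofChars? ((PySem.Chars.slice? (PySem.Chars.slice (PySem.Int.toChars N) none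
        (some (PySem.Int.floordiv ((PySem.Int.toChars N).length : Int) 2))) none none (-1)).getD [])).getD 0 +
      (PySem.Int.ofChars? (PySem.Chars.slice (PySem.Int.toChars N)
        (some (PySem.Int.floordiv ((PySem.Int.toChars N).length : Int) 2)) none)).getD 0
termination_by N.toNat
decreasing_by omega

-- ===== PORT B =====
-- _count_upto: closed form, no recursion (exponents are >= 1 for k >= 1, so `.toNat` is exact)
def countUpto (k : Int) : Int :=
  let p := PySem.Int.floordiv k 2
  let q := PySem.Int.floordiv (k - 1) 2
  11 - k + PySem.Int.floordiv (2 * ((10:Int) ^ (p + 1).toNat - 10)) 9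
         + PySem.Int.floordiv (11 * ((10:Int) ^ (q + 1).toNat - 10)) 9

-- solve (B): str(N) computed once; ''.join(reversed(left)) is List.reverse
def solve_alt (N : Int) : Int :=
  if _h : N < 10 then N
  else
    let s := PySem.Int.toChars N
    let h := PySem.Int.floordiv ((s.length : Int)) 2
    let left := PySem.Chars.slice s none (some h)
    let right := PySem.Chars.slice s (some h) none
    let c2 := (PySem.Int.ofChars? right).getD 0
    let base := countUpto ((s.length : Int) - 1)
    if left = PySem.Int.toChars ((10:Int) ^ (h - 1).toNat) then
      base + c2
    else if c2 = 0 then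
      solve_alt (N - 1) + 1
    else
      base + (PySem.Int.ofChars? left.reverse).getD 0 + c2
termination_by N.toNat
decreasing_by omega

-- ===== PRECONDITION & SPEC =====
def Spec_solve (N : Int) (out : Int) : Prop := out = solve_alt N
instance (N : Int) (out : Int) : Decidable (Spec_solve N out) := by unfold Spec_solve; infer_instance

-- ===== CLAIM (what is proved, stated in full; the proofs are below) =====
def Claim_equal_solve : Prop := ∀ (N : Int), Dom_solve N → Spec_solve N (solve N)

-- ===== LEMMAS AND PROOFS =====

-- `Nat.toDigitsCore` never shrinks its accumulator and, with fuel, adds at least one digit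
lemma toDigitsCore_len_lower (b : Nat) : ∀ (f n : Nat) (l : List Char), 1 ≤ f →
    l.length + 1 ≤ (Nat.toDigitsCore b f n l).length := by
  intro f
  induction f with
  | zero => intro n l h; omega
  | succ f ih =>
    intro n l _
    rw [Nat.toDigitsCore]
    split
    · simp
    · rcases Nat.eq_zero_or_pos f with hf | hf
      · subst hf; simp [Nat.toDigitsCore]
      · exact le_trans (by simp) (ih (n / b) (Nat.digitChar (n % b) :: l) hf)

lemma toDigits_len_two (n : Nat) (hn : 10 ≤ n) : 2 ≤ (Nat.toDigits 10 n).length := by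
  rw [Nat.toDigits, Nat.toDigitsCore]
  rw [if_neg (by omega : ¬ n / 10 = 0)]
  exact le_trans (by simp) (toDigitsCore_len_lower 10 n (n / 10) _ (by omega))

lemma toChars_len_two (N : Int) (hN : 10 ≤ N) : 2 ≤ (PySem.Int.toChars N).length := by
  rw [PySem.Int.toChars, if_neg (by omega : ¬ N < 0)]
  exact toDigits_len_two N.toNat (by omega)

lemma rev_slice (l : List Char) : (PySem.Chars.slice? l none none (-1)).getD [] = l.reverse := by
  simp [pysem, PySem.Chars.slice?]

-- pvS n = 10^1 + … + 10^n, the partial geometric sum both counters are built from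
def pvS : Nat → Int
  | 0 => 0
  | n + 1 => pvS n + (10:Int) ^ (n + 1)

lemma nine_pvS : ∀ n : Nat, 9 * pvS n = (10:Int) ^ (n + 1) - 10 := by
  intro n
  induction n with
  | zero => simp [pvS]
  | succ n ih =>
    rw [pvS]
    rw [pow_succ (10:Int) (n+1)] at *
    linarith

lemma fd_nine (x : Int) : PySem.Int.floordiv (9 * x) 9 = x := by
  rw [PySem.Int.floordiv_eq_ediv_of_pos (by norm_num)]
  exact Int.mul_ediv_cancel_left x (by norm_num)

lemma countUpto_S (n : Nat) :
    countUpto ((n : Int) + 1) = 10 - n + 2 * pvS ((n + 1) / 2) + 11 * pvS (n / 2) := by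
  unfold countUpto
  have hp : PySem.Int.floordiv ((n : Int) + 1) 2 = (((n + 1) / 2 : Nat) : Int) := by
    rw [PySem.Int.floordiv_eq_ediv_of_pos (by norm_num)]; omega
  have hq : PySem.Int.floordiv ((n : Int) + 1 - 1) 2 = ((n / 2 : Nat) : Int) := by
    rw [PySem.Int.floordiv_eq_ediv_of_pos (by norm_num)]; omega
  dsimp only
  rw [hp, hq]
  have e1 : ((((n + 1) / 2 : Nat) : Int) + 1).toNat = (n + 1) / 2 + 1 := by omega
  have e2 : (((n / 2 : Nat) : Int) + 1).toNat = n / 2 + 1 := by omega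
  rw [e1, e2]
  have r1 : (2 * ((10:Int) ^ ((n + 1) / 2 + 1) - 10)) = 9 * (2 * pvS ((n + 1) / 2)) := by
    have := nine_pvS ((n + 1) / 2); linarith
  have r2 : (11 * ((10:Int) ^ (n / 2 + 1) - 10)) = 9 * (11 * pvS (n / 2)) := by
    have := nine_pvS (n / 2); linarith
  rw [r1, r2, fd_nine, fd_nine]
  ring

lemma countTo10_S (n : Nat) :
    countTo10 ((n : Int) + 1) = 10 - n + 2 * pvS ((n + 1) / 2) + 11 * pvS (n / 2) := by
  induction n with
  | zero => rw [countTo10]; norm_num [pvS]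
  | succ n ih =>
    rw [countTo10]
    rw [dif_neg (by push_cast; omega : ¬ ((n + 1 : Nat) : Int) + 1 ≤ 1)]
    have harg : ((n + 1 : Nat) : Int) + 1 - 1 = (n : Int) + 1 := by push_cast; ring
    rw [harg, ih]
    rcases Nat.even_or_odd n with ⟨m, hm⟩ | ⟨m, hm⟩
    · -- n = 2m, k = 2m+2 even
      subst hm
      have hmod : PySem.Int.mod (((m + m + 1 : Nat) : Int) + 1) 2 = 0 := by
        rw [PySem.Int.mod_eq_emod_of_pos (by norm_num)]; omega
      rw [if_pos hmod]
      have hc : PySem.Int.floordiv (((m + m + 1 : Nat) : Int) + 1) 2 = (m : Int) + 1 := by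
        rw [PySem.Int.floordiv_eq_ediv_of_pos (by norm_num)]; omega
      rw [hc]
      dsimp only
      have ht : ((m : Int) + 1).toNat = m + 1 := by omega
      rw [ht]
      have i1 : (m + m + 1 + 1) / 2 = m + 1 := by omega
      have i2 : (m + m + 1) / 2 = m := by omega
      have i3 : (m + m) / 2 = m := by omega
      rw [i1, i2, i3, pvS]
      push_cast; ring
    · -- n = 2m+1, k = 2m+3 odd
      subst hm
      have hmod : ¬ PySem.Int.mod (((2 * m + 1 + 1 : Nat) : Int) + 1) 2 = 0 := by
        rw [PySem.Int.mod_eq_emod_of_pos (by norm_num)]; omega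
      rw [if_neg hmod]
      have hc : PySem.Int.floordiv (((2 * m + 1 : Nat) : Int) + 1) 2 = (m : Int) + 1 := by
        rw [PySem.Int.floordiv_eq_ediv_of_pos (by norm_num)]; omega
      rw [hc]
      dsimp only
      have ht : ((m : Int) + 1).toNat = m + 1 := by omega
      have ht2 : ((m : Int) + 1 + 1).toNat = m + 2 := by omega
      rw [ht, ht2]
      have i1 : (2 * m + 1 + 1 + 1) / 2 = m + 1 := by omega
      have i2 : (2 * m + 1 + 1) / 2 = m + 1 := by omega
      have i3 : (2 * m + 1) / 2 = m := by omega
      rw [i1, i2, i3, pvS]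
      rw [pow_succ (10:Int) (m + 1)]
      push_cast; ring

lemma count_eq (k : Int) (hk : 1 ≤ k) : countTo10 k = countUpto k := by
  obtain ⟨n, rfl⟩ : ∃ n : Nat, k = (n : Int) + 1 := ⟨(k - 1).toNat, by omega⟩
  rw [countTo10_S, countUpto_S]

lemma solve_eq_alt : ∀ (n : Nat) (N : Int), N.toNat ≤ n → solve N = solve_alt N := by
  intro n
  induction n with
  | zero =>
    intro N h
    rw [solve, solve_alt]
    rw [dif_pos (by omega : N < 10), dif_pos (by omega : N < 10)]
  | succ n ih =>
    intro N h
    rw [solve, solve_alt]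
    by_cases h10 : N < 10
    · rw [dif_pos h10, dif_pos h10]
    · rw [dif_neg h10, dif_neg h10]
      have hlen : 2 ≤ (PySem.Int.toChars N).length := toChars_len_two N (by omega)
      have hcnt : countTo10 (((PySem.Int.toChars N).length : Int) - 1) =
          countUpto (((PySem.Int.toChars N).length : Int) - 1) :=
        count_eq _ (by omega)
      have hrec : solve (N - 1) = solve_alt (N - 1) := ih (N - 1) (by omega)
      simp only [hcnt, rev_slice, hrec]

-- ===== VERDICT (by name: the statement is the Claim_ definition above) =====
theorem solve_spec : Claim_equal_solve := by
  intro N _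
  unfold Spec_solve
  exact solve_eq_alt N.toNat N le_rfl
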